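-- pv_equiv track=rewrite | github.com/bangtugu/Algorithm | PROGRAMMERS/디펜스_게임.py | solution
-- ===== SOURCE A (Python) =====
-- def solution(n, k, enemy):
--     heap_lst = [0]
--
--
--     def heapappend(n):
--         heap_lst.append(n)
--         now_index = len(heap_lst) - 1
--
--         while now_index != 1:
--             if heap_lst[now_index//2] < heap_lst[now_index]:
--                 heap_lst[now_index//2], heap_lst[now_index] = heap_lst[now_index], heap_lst[now_index//2]
--                 now_index = now_index//2
--             else:
--                 return
--
--         return
--
--
--     def heappopmax():
--
--         head = heap_lst[1]
--         now_index = 1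
--
--         if len(heap_lst) == 2:
--             return heap_lst.pop(1)
--
--         heap_lst[1] = heap_lst.pop()
--
--         while now_index < len(heap_lst):
--
--             target_index = now_index
--             child_1 = now_index*2
--             child_2 = now_index*2+1
--
--             if child_1 < len(heap_lst) and heap_lst[child_1] > heap_lst[target_index]:
--                 target_index = child_1
--             if child_2 < len(heap_lst) and heap_lst[child_2] > heap_lst[target_index]:
--                 target_index = child_2
--
--             if target_index == now_index:
--                 return head
--             else:
--                 heap_lst[now_index], heap_lst[target_index] = heap_lst[target_index], heap_lst[now_index]
--                 now_index = target_index
--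
--         return head
--
--
--     i = 0
--
--     while i < len(enemy):
--
--         now_enemy = enemy[i]
--
--         n -= now_enemy
--         heapappend(now_enemy)
--
--         if n < 0:
--             if k:
--                 now_k = heappopmax()
--                 n += now_k
--                 k -= 1
--             else:
--                 return i
--
--         i += 1
--
--     return len(enemy)
-- ===== SOURCE B (Python) =====
-- def solution(n, k, enemy):
--     pool = []  # waves seen so far and not yet refunded
--     for i, e in enumerate(enemy):
--         pool.append(e)
--         n -= e
--         if n < 0:
--             if k == 0:
--                 return i
--             big = max(pool)
--             pool.remove(big)
--             n += big
--             k -= 1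
--     return len(enemy)
-- ===== Notes on version B (the rewrite author's own statement) =====
-- stated objective: simpler
-- what changed: A maintains a hand-rolled 1-indexed binary max-heap (append + sift-up, pop-max + sift-down, ~50 lines); B keeps a plain list of the waves seen so far and, when a refund is needed, takes max(pool) and removes it, so all heap machinery disappears.
import Mathlib
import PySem

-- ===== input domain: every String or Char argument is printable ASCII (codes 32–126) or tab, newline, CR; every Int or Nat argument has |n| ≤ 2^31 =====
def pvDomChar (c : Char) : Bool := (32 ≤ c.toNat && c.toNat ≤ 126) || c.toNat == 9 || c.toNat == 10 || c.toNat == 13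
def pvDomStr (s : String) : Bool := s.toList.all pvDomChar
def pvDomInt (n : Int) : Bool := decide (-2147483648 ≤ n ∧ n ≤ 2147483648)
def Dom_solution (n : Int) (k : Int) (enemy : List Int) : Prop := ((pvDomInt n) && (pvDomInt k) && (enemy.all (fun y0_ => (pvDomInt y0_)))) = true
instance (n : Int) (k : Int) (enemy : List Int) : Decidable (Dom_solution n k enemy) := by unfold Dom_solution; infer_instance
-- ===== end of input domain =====

-- B replaces A's ~50-line hand-rolled binary max-heap with a plain pool refunded via max/remove (simpler; no speed claim).

-- ===== PORT A =====
-- every Python list index in A is in range on reachable states; `hget` reads with a default that is never used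
def hget (h : List Int) (i : Nat) : Int := h.getD i 0

-- the `while now_index != 1` loop of A's heapappend (swap with parent while parent is smaller)
def siftUp (h : List Int) (i : Nat) : List Int :=
  if _h2 : 2 ≤ i then
    if hget h (i / 2) < hget h i then
      siftUp ((h.set (i / 2) (hget h i)).set i (hget h (i / 2))) (i / 2)
    else h
  else h
  termination_by i
  decreasing_by exact Nat.div_lt_self (by omega) (by omega)

def heapappend (h : List Int) (x : Int) : List Int := siftUp (h ++ [x]) h.length

-- the `while now_index < len(heap_lst)` loop of A's heappopmax; the index strictly grows,
-- so fuel `h.length` always outlasts the loop and the port is exact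
def siftDown (h : List Int) (now : Nat) : Nat → List Int
  | 0 => h
  | fuel + 1 =>
    if now < h.length then
      let t1 := if now * 2 < h.length ∧ hget h now < hget h (now * 2) then now * 2 else now
      let t2 := if now * 2 + 1 < h.length ∧ hget h t1 < hget h (now * 2 + 1) then now * 2 + 1 else t1
      if t2 = now then h
      else siftDown ((h.set now (hget h t2)).set t2 (hget h now)) t2 fuel
    else h

def heappopmax (h : List Int) : Int × List Int :=
  let head := hget h 1
  if h.length = 2 then (head, h.take 1)
  else
    let h1 := h.dropLast.set 1 (hget h (h.length - 1))
    (head, siftDown h1 1 h1.length)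

def loopA (es : List Int) (i : Nat) (n k : Int) (h : List Int) : Int :=
  match es with
  | [] => (i : Int)
  | e :: rest =>
    let n' := n - e
    let h' := heapappend h e
    if n' < 0 then
      if k ≠ 0 then
        let p := heappopmax h'
        loopA rest (i + 1) (n' + p.1) (k - 1) p.2
      else (i : Int)
    else loopA rest (i + 1) n' k h'

def solution (n : Int) (k : Int) (enemy : List Int) : Int := loopA enemy 0 n k [0]

-- ===== PORT B =====
def loopB (es : List Int) (i : Nat) (n k : Int) (pool : List Int) : Int :=
  match es with
  | [] => (i : Int)
  | e :: rest =>
    let pool' := pool ++ [e]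
    let n' := n - e
    if n' < 0 then
      if k = 0 then (i : Int)
      else
        let big := (PySem.List.max? pool' (fun y => y)).getD 0
        loopB rest (i + 1) (n' + big) (k - 1) ((PySem.List.remove? pool' big).getD pool')
    else loopB rest (i + 1) n' k pool'

def solution_alt (n : Int) (k : Int) (enemy : List Int) : Int := loopB enemy 0 n k []

-- ===== PRECONDITION & SPEC =====
def Spec_solution (n : Int) (k : Int) (enemy : List Int) (out : Int) : Prop := out = solution_alt n k enemy
instance (n : Int) (k : Int) (enemy : List Int) (out : Int) : Decidable (Spec_solution n k enemy out) := by unfold Spec_solution; infer_instance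

-- ===== CLAIM (what is proved, stated in full; the proofs are below) =====
def Claim_equal_solution : Prop := ∀ (n : Int) (k : Int) (enemy : List Int), Dom_solution n k enemy → Spec_solution n k enemy (solution n k enemy)

-- ===== LEMMAS AND PROOFS =====

-- the max-heap property of A's heap list (slot 0 is a dummy)
def HP (h : List Int) : Prop := ∀ j, 2 ≤ j → j < h.length → hget h j ≤ hget h (j / 2)

-- coupling invariant between A's heap list and B's pool
def CoupInv (h pool : List Int) : Prop :=
  hget h 0 = 0 ∧ 1 ≤ h.length ∧ HP h ∧ List.Perm h (0 :: pool)

theorem hget_eq_getElem (h : List Int) (j : Nat) (hj : j < h.length) :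
    hget h j = h[j] := by
  simp [hget, List.getD_eq_getElem?_getD, List.getElem?_eq_getElem hj]

theorem hget_set_self (h : List Int) (i : Nat) (a : Int) (hi : i < h.length) :
    hget (h.set i a) i = a := by
  simp [hget, List.getD_eq_getElem?_getD, List.getElem?_set_self', List.getElem?_eq_getElem hi]

theorem hget_set_ne (h : List Int) (i j : Nat) (a : Int) (hij : i ≠ j) :
    hget (h.set i a) j = hget h j := by
  simp [hget, List.getD_eq_getElem?_getD, List.getElem?_set_ne hij]

theorem hget_swap (h : List Int) (i j m : Nat) (hi : i < h.length) (hj : j < h.length) :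
    hget ((h.set i (hget h j)).set j (hget h i)) m =
      if m = j then hget h i else if m = i then hget h j else hget h m := by
  by_cases hmj : m = j
  · subst hmj; rw [if_pos rfl]
    exact hget_set_self _ _ _ (by simpa using hj)
  · rw [hget_set_ne _ _ _ _ (fun hh => hmj hh.symm), if_neg hmj]
    by_cases hmi : m = i
    · subst hmi; rw [if_pos rfl]; exact hget_set_self _ _ _ hi
    · rw [hget_set_ne _ _ _ _ (fun hh => hmi hh.symm), if_neg hmi]

theorem count_set (h : List Int) (i : Nat) (a x : Int) (hi : i < h.length) :
    (h.set i a).count x + (if hget h i = x then 1 else 0)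
      = h.count x + (if a = x then 1 else 0) := by
  have h1 := (List.set_perm_cons_eraseIdx hi a).count_eq x
  have h2 := (List.getElem_cons_eraseIdx_perm hi).count_eq x
  have hg : hget h i = h[i] := hget_eq_getElem h i hi
  rw [List.count_cons] at h1 h2
  rw [hg, h1, ← h2]
  simp only [beq_iff_eq]
  split_ifs <;> omega

theorem swap_perm (h : List Int) (i j : Nat) (hi : i < h.length) (hj : j < h.length) :
    List.Perm ((h.set i (hget h j)).set j (hget h i)) h := by
  rw [List.perm_iff_count]
  intro x
  have k1 := count_set h i (hget h j) x hi
  have k2 := count_set (h.set i (hget h j)) j (hget h i) x (by simpa using hj)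
  have hv : hget (h.set i (hget h j)) j = hget h j := by
    by_cases hij : i = j
    · subst hij; exact hget_set_self _ _ _ hi
    · exact hget_set_ne _ _ _ _ hij
  rw [hv] at k2
  split_ifs at k1 k2 <;> omega

theorem siftUp_spec : ∀ (i : Nat) (h : List Int), i < h.length →
    (∀ j, 2 ≤ j → j < h.length → j ≠ i → hget h j ≤ hget h (j / 2)) →
    (2 ≤ i → ∀ c, 2 ≤ c → c < h.length → c / 2 = i → hget h c ≤ hget h (i / 2)) →
    HP (siftUp h i) ∧ List.Perm (siftUp h i) h ∧ hget (siftUp h i) 0 = hget h 0 := by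
  intro i
  induction i using Nat.strong_induction_on with
  | _ i IH =>
    intro h hi h0 h1
    rw [siftUp]
    by_cases h2 : 2 ≤ i
    · by_cases hcmp : hget h (i / 2) < hget h i
      · simp only [dif_pos h2, if_pos hcmp]
        have hi2 : i / 2 < h.length := lt_of_le_of_lt (Nat.div_le_self i 2) hi
        have hv : ∀ m, hget ((h.set (i / 2) (hget h i)).set i (hget h (i / 2))) m =
            if m = i then hget h (i / 2) else if m = i / 2 then hget h i else hget h m :=
          fun m => hget_swap h (i / 2) i m hi2 hi
        have hne : i / 2 ≠ i := by omega
        have hlen : ((h.set (i / 2) (hget h i)).set i (hget h (i / 2))).length = h.length := by simp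
        obtain ⟨hp', hperm', h0'⟩ := IH (i / 2) (by omega)
          ((h.set (i / 2) (hget h i)).set i (hget h (i / 2)))
          (by rw [hlen]; exact hi2)
          (by -- clause 0 for the swapped list at i/2
            intro j hj2 hjl hjne
            rw [hlen] at hjl
            rw [hv j, hv (j / 2)]
            by_cases e1 : j = i
            · subst e1
              have hne2 : j / 2 ≠ j := by omega
              rw [if_pos rfl, if_neg hne2, if_pos rfl]
              exact le_of_lt hcmp
            · rw [if_neg e1, if_neg hjne]
              by_cases e2 : j / 2 = i
              · rw [if_pos e2]
                exact h1 h2 j hj2 hjl e2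
              · rw [if_neg e2]
                by_cases e3 : j / 2 = i / 2
                · rw [if_pos e3]
                  have hx := h0 j hj2 hjl e1
                  rw [e3] at hx
                  exact le_trans hx (le_of_lt hcmp)
                · rw [if_neg e3]
                  exact h0 j hj2 hjl e1)
          (by -- clause 1 for the swapped list at i/2
            intro hi22 c hc2 hcl hcdiv
            rw [hlen] at hcl
            have hi4 : 4 ≤ i := by omega
            rw [hv c, hv (i / 2 / 2)]
            rw [if_neg (by omega : ¬ i / 2 / 2 = i), if_neg (by omega : ¬ i / 2 / 2 = i / 2)]
            by_cases ec : c = i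
            · subst ec
              rw [if_pos rfl]
              exact h0 (c / 2) (by omega) (by omega) (by omega)
            · rw [if_neg ec, if_neg (by omega : ¬ c = i / 2)]
              have hx := h0 c hc2 hcl ec
              rw [hcdiv] at hx
              exact le_trans hx (h0 (i / 2) (by omega) (by omega) (by omega)))
        refine ⟨hp', hperm'.trans (swap_perm h (i / 2) i hi2 hi), ?_⟩
        rw [h0', hv 0, if_neg (by omega : ¬ (0:Nat) = i), if_neg (by omega : ¬ (0:Nat) = i / 2)]
      · simp only [dif_pos h2, if_neg hcmp]
        refine ⟨?_, List.Perm.refl h, by trivial⟩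
        intro j hj2 hjl
        by_cases hji : j = i
        · subst hji; exact not_lt.mp hcmp
        · exact h0 j hj2 hjl hji
    · simp only [dif_neg h2]
      refine ⟨?_, List.Perm.refl h, by trivial⟩
      intro j hj2 hjl
      exact h0 j hj2 hjl (by omega)

theorem hget_append_lt (h : List Int) (x : Int) (j : Nat) (hj : j < h.length) :
    hget (h ++ [x]) j = hget h j := by
  simp [hget, List.getD_eq_getElem?_getD, List.getElem?_append_left hj]

theorem heapappend_spec (h : List Int) (x : Int) (hp : HP h) (hl : 1 ≤ h.length) :
    HP (heapappend h x) ∧ List.Perm (heapappend h x) (h ++ [x]) ∧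
      hget (heapappend h x) 0 = hget h 0 := by
  unfold heapappend
  have hi : h.length < (h ++ [x]).length := by simp
  obtain ⟨hp', hperm', h0'⟩ := siftUp_spec h.length (h ++ [x]) hi
    (by
      intro j hj2 hjl hjne
      have hjlt : j < h.length := by simp at hjl; omega
      rw [hget_append_lt _ _ _ hjlt, hget_append_lt _ _ _ (by omega : j / 2 < h.length)]
      exact hp j hj2 hjlt)
    (by
      intro h2 c hc2 hcl hcdiv
      simp at hcl
      omega)
  refine ⟨hp', hperm', ?_⟩
  rw [h0', hget_append_lt _ _ _ (by omega : 0 < h.length)]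

theorem siftDown_step (h : List Int) (now t : Nat) (h1 : 1 ≤ now) (_hlt : now < h.length)
    (ht : t = now * 2 ∨ t = now * 2 + 1) (htl : t < h.length)
    (hroot : hget h now < hget h t)
    (hsib : ∀ s, (s = now * 2 ∨ s = now * 2 + 1) → s ≠ t → s < h.length → hget h s ≤ hget h t)
    (c0 : ∀ j, 2 ≤ j → j < h.length → j / 2 ≠ now → hget h j ≤ hget h (j / 2))
    (c1 : 2 ≤ now → ∀ c, c < h.length → c / 2 = now → hget h c ≤ hget h (now / 2)) :
    (∀ j, 2 ≤ j → j < ((h.set now (hget h t)).set t (hget h now)).length → j / 2 ≠ t →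
        hget ((h.set now (hget h t)).set t (hget h now)) j
          ≤ hget ((h.set now (hget h t)).set t (hget h now)) (j / 2)) ∧
      (2 ≤ t → ∀ c, c < ((h.set now (hget h t)).set t (hget h now)).length → c / 2 = t →
        hget ((h.set now (hget h t)).set t (hget h now)) c
          ≤ hget ((h.set now (hget h t)).set t (hget h now)) (t / 2)) := by
  have hnt : now < t := by omega
  have hv : ∀ m, hget ((h.set now (hget h t)).set t (hget h now)) m =
      if m = t then hget h now else if m = now then hget h t else hget h m :=
    fun m => hget_swap h now t m _hlt htl
  have hlen : ((h.set now (hget h t)).set t (hget h now)).length = h.length := by simp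
  constructor
  · intro j hj2 hjl hjne
    rw [hlen] at hjl
    rw [hv j, hv (j / 2)]
    by_cases e1 : j = t
    · subst e1
      have e2 : j / 2 = now := by omega
      rw [if_pos rfl, if_neg (by omega : ¬ j / 2 = j), e2, if_pos rfl]
      exact le_of_lt hroot
    · rw [if_neg e1]
      by_cases e2 : j = now
      · subst e2
        rw [if_pos rfl, if_neg (by omega : ¬ j / 2 = t), if_neg (by omega : ¬ j / 2 = j)]
        exact c1 hj2 t htl (by omega)
      · rw [if_neg e2]
        by_cases e3 : j / 2 = now
        · rw [if_neg (by omega : ¬ j / 2 = t), e3, if_pos rfl]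
          exact hsib j (by omega) e1 hjl
        · rw [if_neg hjne, if_neg e3]
          exact c0 j hj2 hjl e3
  · intro h2t c hcl hcdiv
    rw [hlen] at hcl
    have hct : t < c := by omega
    have ht2 : t / 2 = now := by omega
    rw [hv c, hv (t / 2), ht2, if_neg (by omega : ¬ now = t), if_pos rfl,
      if_neg (by omega : ¬ c = t), if_neg (by omega : ¬ c = now)]
    have hx := c0 c (by omega) hcl (by omega)
    rw [hcdiv] at hx
    exact hx

theorem siftDown_spec : ∀ (fuel : Nat) (h : List Int) (now : Nat), 1 ≤ now →
    h.length - now < fuel →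
    (∀ j, 2 ≤ j → j < h.length → j / 2 ≠ now → hget h j ≤ hget h (j / 2)) →
    (2 ≤ now → ∀ c, c < h.length → c / 2 = now → hget h c ≤ hget h (now / 2)) →
    HP (siftDown h now fuel) ∧ List.Perm (siftDown h now fuel) h ∧
      hget (siftDown h now fuel) 0 = hget h 0 := by
  intro fuel
  induction fuel with
  | zero => intro h now h1 hf c0 c1; omega
  | succ f IHf =>
    intro h now h1 hf c0 c1
    simp only [siftDown]
    by_cases hlt : now < h.length
    · simp only [if_pos hlt]
      by_cases hc1 : now * 2 < h.length ∧ hget h now < hget h (now * 2)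
      · simp only [if_pos hc1]
        by_cases hc2 : now * 2 + 1 < h.length ∧ hget h (now * 2) < hget h (now * 2 + 1)
        · -- target = now*2+1
          simp only [if_pos hc2, if_neg (by omega : ¬ now * 2 + 1 = now)]
          have hstep := siftDown_step h now (now * 2 + 1) h1 hlt (Or.inr rfl) hc2.1
            (lt_trans hc1.2 hc2.2)
            (by intro s hs hsne hsl
                have hseq : s = now * 2 := by omega
                subst hseq; exact le_of_lt hc2.2)
            c0 c1
          obtain ⟨hp', hperm', h0'⟩ := IHf ((h.set now (hget h (now * 2 + 1))).set (now * 2 + 1) (hget h now)) (now * 2 + 1)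
            (by omega) (by simp only [List.length_set]; omega) hstep.1 hstep.2
          refine ⟨hp', hperm'.trans (swap_perm h now (now * 2 + 1) hlt hc2.1), ?_⟩
          rw [h0', hget_swap h now (now * 2 + 1) 0 hlt hc2.1,
            if_neg (by omega : ¬ (0:Nat) = now * 2 + 1), if_neg (by omega : ¬ (0:Nat) = now)]
        · -- target = now*2
          simp only [if_neg hc2, if_neg (by omega : ¬ now * 2 = now)]
          have hstep := siftDown_step h now (now * 2) h1 hlt (Or.inl rfl) hc1.1 hc1.2
            (by intro s hs hsne hsl
                have hseq : s = now * 2 + 1 := by omega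
                subst hseq
                rcases not_and_or.mp hc2 with hbad | hle
                · omega
                · exact not_lt.mp hle)
            c0 c1
          obtain ⟨hp', hperm', h0'⟩ := IHf ((h.set now (hget h (now * 2))).set (now * 2) (hget h now)) (now * 2)
            (by omega) (by simp only [List.length_set]; omega) hstep.1 hstep.2
          refine ⟨hp', hperm'.trans (swap_perm h now (now * 2) hlt hc1.1), ?_⟩
          rw [h0', hget_swap h now (now * 2) 0 hlt hc1.1,
            if_neg (by omega : ¬ (0:Nat) = now * 2), if_neg (by omega : ¬ (0:Nat) = now)]
      · simp only [if_neg hc1]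
        by_cases hc2 : now * 2 + 1 < h.length ∧ hget h now < hget h (now * 2 + 1)
        · -- target = now*2+1, first child not better
          simp only [if_pos hc2, if_neg (by omega : ¬ now * 2 + 1 = now)]
          have hstep := siftDown_step h now (now * 2 + 1) h1 hlt (Or.inr rfl) hc2.1 hc2.2
            (by intro s hs hsne hsl
                have hseq : s = now * 2 := by omega
                subst hseq
                rcases not_and_or.mp hc1 with hbad | hle
                · omega
                · exact le_trans (not_lt.mp hle) (le_of_lt hc2.2))
            c0 c1
          obtain ⟨hp', hperm', h0'⟩ := IHf ((h.set now (hget h (now * 2 + 1))).set (now * 2 + 1) (hget h now)) (now * 2 + 1)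
            (by omega) (by simp only [List.length_set]; omega) hstep.1 hstep.2
          refine ⟨hp', hperm'.trans (swap_perm h now (now * 2 + 1) hlt hc2.1), ?_⟩
          rw [h0', hget_swap h now (now * 2 + 1) 0 hlt hc2.1,
            if_neg (by omega : ¬ (0:Nat) = now * 2 + 1), if_neg (by omega : ¬ (0:Nat) = now)]
        · -- no child better: the heap is restored, return h
          simp only [if_neg hc2, if_true]
          refine ⟨?_, List.Perm.refl h, by trivial⟩
          intro j hj2 hjl
          by_cases e : j / 2 = now
          · have hj12 : j = now * 2 ∨ j = now * 2 + 1 := by omega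
            rcases hj12 with e1 | e1 <;> subst e1 <;> rw [e]
            · rcases not_and_or.mp hc1 with hbad | hle
              · omega
              · exact not_lt.mp hle
            · rcases not_and_or.mp hc2 with hbad | hle
              · omega
              · exact not_lt.mp hle
          · exact c0 j hj2 hjl e
    · simp only [if_neg hlt]
      refine ⟨?_, List.Perm.refl h, by trivial⟩
      intro j hj2 hjl
      exact c0 j hj2 hjl (by omega)

theorem root_max (h : List Int) (hp : HP h) : ∀ j, 1 ≤ j → j < h.length → hget h j ≤ hget h 1 := by
  intro j
  induction j using Nat.strong_induction_on with
  | _ j IH =>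
    intro hj1 hjl
    rcases Nat.lt_or_ge j 2 with hj2 | hj2
    · have hj : j = 1 := by omega
      subst hj; exact le_refl _
    · exact le_trans (hp j hj2 hjl) (IH (j / 2) (by omega) (by omega) (by omega))

theorem hget_dropLast (h : List Int) (m : Nat) (hm : m < h.length - 1) :
    hget h.dropLast m = hget h m := by
  simp only [hget, List.getD_eq_getElem?_getD, List.getElem?_dropLast]
  rw [if_pos hm]

theorem heappopmax_fst (h : List Int) : (heappopmax h).1 = hget h 1 := by
  unfold heappopmax
  by_cases hl : h.length = 2 <;> simp [hl]

theorem heappopmax_spec (h : List Int) (hp : HP h) (hl : 2 ≤ h.length) :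
    HP (heappopmax h).2 ∧ List.Perm h ((heappopmax h).1 :: (heappopmax h).2) ∧
      (∀ j, 1 ≤ j → j < h.length → hget h j ≤ (heappopmax h).1) ∧
      hget (heappopmax h).2 0 = hget h 0 := by
  by_cases hl2 : h.length = 2
  · obtain ⟨a, b, rfl⟩ := List.length_eq_two.mp hl2
    have hH : heappopmax [a, b] = (b, [a]) := rfl
    rw [hH]
    refine ⟨?_, ?_, ?_, ?_⟩
    · intro j hj2 hjl
      simp at hjl
      omega
    · exact List.Perm.swap b a []
    · intro j hj1 hjl
      simp at hjl
      have hj : j = 1 := by omega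
      subst hj
      exact le_refl _
    · rfl
  · have hl3 : 3 ≤ h.length := by omega
    have hne : h ≠ [] := by intro hh; subst hh; simp at hl
    have hdl : h.dropLast.length = h.length - 1 := by simp
    have h1lt : 1 < h.dropLast.length := by omega
    have hfst : (heappopmax h).1 = hget h 1 := heappopmax_fst h
    set h1 := h.dropLast.set 1 (hget h (h.length - 1)) with hh1
    have hsnd : (heappopmax h).2 = siftDown h1 1 h1.length := by
      simp only [heappopmax, if_neg hl2, ← hh1]
    have hlen1 : h1.length = h.length - 1 := by simp [hh1]
    have hv1 : ∀ m, m ≠ 1 → m < h.length - 1 → hget h1 m = hget h m := by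
      intro m hm1 hml
      rw [hh1, hget_set_ne _ _ _ _ (fun hh => hm1 hh.symm), hget_dropLast _ _ hml]
    obtain ⟨hp', hperm', h0'⟩ := siftDown_spec h1.length h1 1 (le_refl 1)
      (by omega)
      (by
        intro j hj2 hjl hjne
        rw [hlen1] at hjl
        have hj4 : 4 ≤ j := by omega
        rw [hv1 j (by omega) hjl, hv1 (j / 2) (by omega) (by omega)]
        exact hp j hj2 (by omega))
      (by intro hbad; omega)
    refine ⟨?_, ?_, ?_, ?_⟩
    · rw [hsnd]; exact hp'
    · rw [hfst, hsnd]
      have e1 : h.dropLast ++ [h.getLast hne] = h := List.dropLast_append_getLast hne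
      have hlast : h.getLast hne = hget h (h.length - 1) := by
        rw [List.getLast_eq_getElem, hget_eq_getElem h _ (by omega)]
      have p0 : List.Perm h (hget h (h.length - 1) :: h.dropLast) := by
        conv_lhs => rw [← e1]
        rw [hlast]
        exact List.perm_append_singleton _ _
      have p1 : List.Perm h1 (hget h (h.length - 1) :: h.dropLast.eraseIdx 1) :=
        List.set_perm_cons_eraseIdx h1lt _
      have hdl1 : h.dropLast[1] = hget h 1 := by
        rw [← hget_eq_getElem _ _ h1lt, hget_dropLast _ _ (by omega)]
      have p2 : List.Perm h.dropLast (hget h 1 :: h.dropLast.eraseIdx 1) := by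
        rw [← hdl1]
        exact (List.getElem_cons_eraseIdx_perm h1lt).symm
      refine p0.trans ((List.Perm.cons _ p2).trans ?_)
      refine (List.Perm.swap _ _ _).trans ?_
      exact List.Perm.cons _ ((p1.symm).trans hperm'.symm)
    · rw [hfst]
      exact root_max h hp
    · rw [hsnd, h0', hh1, hget_set_ne _ _ _ _ (by omega : (1:Nat) ≠ 0),
        hget_dropLast _ _ (by omega)]

theorem loop_coupling : ∀ (es : List Int) (i : Nat) (n k : Int) (h pool : List Int),
    CoupInv h pool → loopA es i n k h = loopB es i n k pool := by
  intro es
  induction es with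
  | nil => intro i n k h pool _; rfl
  | cons e rest IH =>
    intro i n k h pool inv
    obtain ⟨hz, hlen1, hp, hperm⟩ := inv
    obtain ⟨hpA, hpermA, hzA⟩ := heapappend_spec h e hp hlen1
    have hzA0 : hget (heapappend h e) 0 = 0 := by rw [hzA, hz]
    have hpermH : List.Perm (heapappend h e) (0 :: (pool ++ [e])) := by
      refine hpermA.trans ?_
      have hx := hperm.append_right [e]
      simpa using hx
    have hlenH : (heapappend h e).length = pool.length + 2 := by
      have hx := hpermH.length_eq
      simpa using hx
    simp only [loopA, loopB]
    by_cases hneg : n - e < 0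
    · simp only [if_pos hneg]
      by_cases hk : k = 0
      · simp [hk]
      · rw [if_pos hk, if_neg hk]
        obtain ⟨m, hmax⟩ : ∃ m, PySem.List.max? (pool ++ [e]) (fun y => y) = some m := by
          cases hm : PySem.List.max? (pool ++ [e]) (fun y => y) with
          | none => exact absurd ((PySem.List.max?_eq_none_iff _ _).mp hm) (by simp)
          | some m => exact ⟨m, rfl⟩
        have hm_mem : m ∈ pool ++ [e] := PySem.List.max?_mem hmax
        have hm_max : ∀ y ∈ pool ++ [e], y ≤ m := fun y hy => PySem.List.max?_isMax hmax y hy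
        obtain ⟨hpP, hpermP, hrootP, hzP⟩ := heappopmax_spec (heapappend h e) hpA (by omega)
        obtain ⟨t', ht'⟩ : ∃ t, heapappend h e = 0 :: t := by
          cases hH : heapappend h e with
          | nil => rw [hH] at hlenH; simp at hlenH
          | cons a t =>
            refine ⟨t, ?_⟩
            have ha : a = 0 := by rw [hH] at hzA0; simpa [hget] using hzA0
            rw [ha]
        have htlen : t'.length = pool.length + 1 := by
          rw [ht'] at hlenH; simp at hlenH; omega
        have hpermT : List.Perm t' (pool ++ [e]) := by
          have hx := hpermH
          rw [ht'] at hx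
          exact hx.cons_inv
        have hfstv : (heappopmax (heapappend h e)).1 = hget (heapappend h e) 1 :=
          heappopmax_fst _
        have hv_le : (heappopmax (heapappend h e)).1 ≤ m := by
          apply hm_max
          rw [hfstv, ht']
          have h0lt : 0 < t'.length := by omega
          have hx : hget (0 :: t') 1 = t'[0] := by
            rw [show hget (0 :: t') 1 = hget t' 0 from by simp [hget],
              hget_eq_getElem t' 0 h0lt]
          rw [hx]
          exact hpermT.mem_iff.mp (List.getElem_mem h0lt)
        have hm_le : m ≤ (heappopmax (heapappend h e)).1 := by
          obtain ⟨j, hj, hje⟩ := List.getElem_of_mem (hpermT.mem_iff.mpr hm_mem)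
          have hx : hget (heapappend h e) (j + 1) = m := by
            rw [ht', show hget (0 :: t') (j + 1) = hget t' j from by simp [hget],
              hget_eq_getElem t' j hj, hje]
          rw [← hx]
          exact hrootP (j + 1) (by omega) (by rw [ht']; simp; omega)
        have hveq : (heappopmax (heapappend h e)).1 = m := le_antisymm hv_le hm_le
        have hrem : (PySem.List.remove? (pool ++ [e]) m).getD (pool ++ [e])
            = (pool ++ [e]).erase m := by
          rw [PySem.List.remove?_eq_some_erase _ m hm_mem]
          rfl
        rw [hmax]
        simp only [Option.getD_some]
        rw [hrem, hveq]
        apply IH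
        refine ⟨?_, ?_, hpP, ?_⟩
        · rw [hzP, hzA0]
        · have hx := hpermP.length_eq
          rw [hlenH] at hx
          simp at hx
          omega
        · have step1 : List.Perm ((heappopmax (heapappend h e)).1 :: (heappopmax (heapappend h e)).2)
              (0 :: (pool ++ [e])) := hpermP.symm.trans hpermH
          have step2 : List.Perm (0 :: (pool ++ [e])) (0 :: m :: (pool ++ [e]).erase m) :=
            List.Perm.cons _ (List.perm_cons_erase hm_mem)
          have step3 : List.Perm (0 :: m :: (pool ++ [e]).erase m)
              (m :: 0 :: (pool ++ [e]).erase m) := List.Perm.swap _ _ _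
          have hx := (step1.trans step2).trans step3
          rw [hveq] at hx
          exact hx.cons_inv
    · simp only [if_neg hneg]
      exact IH _ _ _ _ _ ⟨hzA0, by omega, hpA, hpermH⟩

-- ===== VERDICT (by name: the statement is the Claim_ definition above) =====
theorem solution_spec : Claim_equal_solution := by
  intro n k enemy _
  unfold Spec_solution solution solution_alt
  refine loop_coupling enemy 0 n k [0] [] ⟨rfl, by simp, ?_, by simp⟩
  intro j hj2 hjl
  simp at hjl
  omega
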